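-- pv_equiv track=rewrite | github.com/Ansukr07/bmsce-synthverse | api/routers/visualization.py | _timeline_sample
-- ===== SOURCE A (Python) =====
-- def _timeline_sample(timeline_full: list[dict], sample_step: int) -> list[dict]:
--     if not timeline_full:
--         return []
--
--     step = max(1, int(sample_step))
--     if step <= 1:
--         return timeline_full
--
--     last_idx = len(timeline_full) - 1
--     sampled = [row for idx, row in enumerate(timeline_full) if (idx % step) == 0 or idx == last_idx]
--     if sampled and sampled[-1] is not timeline_full[last_idx]:
--         sampled.append(timeline_full[last_idx])
--     return sampled
-- ===== SOURCE B (Python) =====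
-- def _timeline_sample(timeline_full: list[dict], sample_step: int) -> list[dict]:
--     if not timeline_full:
--         return []
--
--     step = max(1, int(sample_step))
--     if step <= 1:
--         return timeline_full
--
--     sampled = timeline_full[::step]
--     if (len(timeline_full) - 1) % step != 0:
--         sampled.append(timeline_full[-1])
--     return sampled
-- ===== Notes on version B (the rewrite author's own statement) =====
-- stated objective: idiomatic
-- what changed: Replaces the full-length enumerate/modulo comprehension plus dead identity-checked append with a direct stride slice timeline_full[::step] and a single arithmetic test ((len-1) % step != 0) deciding whether to append the last row.
import Mathlib
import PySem

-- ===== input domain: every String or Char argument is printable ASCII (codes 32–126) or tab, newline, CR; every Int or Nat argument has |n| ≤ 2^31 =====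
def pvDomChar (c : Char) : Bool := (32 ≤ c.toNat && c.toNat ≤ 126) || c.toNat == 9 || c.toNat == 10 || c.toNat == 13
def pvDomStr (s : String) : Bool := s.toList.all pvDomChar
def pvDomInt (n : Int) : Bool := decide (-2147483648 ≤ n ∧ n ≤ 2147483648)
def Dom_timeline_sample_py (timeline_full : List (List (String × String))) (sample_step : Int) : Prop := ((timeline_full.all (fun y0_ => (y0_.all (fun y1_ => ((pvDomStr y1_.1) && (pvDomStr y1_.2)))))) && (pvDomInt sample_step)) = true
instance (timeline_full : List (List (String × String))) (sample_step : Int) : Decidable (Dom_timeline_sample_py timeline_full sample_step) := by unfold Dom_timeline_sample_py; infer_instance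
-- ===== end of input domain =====

-- B replaces A's full-length enumerate/modulo comprehension (with its dead identity-checked
-- append) by a direct stride slice tf[::step] plus one arithmetic test for the last row; same values.


-- ===== PORT A =====
-- Literal port of A. `sampled[-1] is not timeline_full[last_idx]` (object identity) is ported as
-- value inequality; both tests are False on every input reaching them, because the comprehension
-- always keeps index last_idx, so its last element IS timeline_full[last_idx] (proved below).
-- `timeline_full[last_idx]` is in range (the list is nonempty), so pyGetD's default is never used.
def timeline_sample_py (timeline_full : List (List (String × String))) (sample_step : Int) : List (List (String × String)) :=
  if timeline_full = [] then []
  else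
    let step : Int := max 1 sample_step
    if step ≤ 1 then timeline_full
    else
      let lastIdx : Int := (timeline_full.length : Int) - 1
      let sampled := ((PySem.List.enumerate timeline_full).filter
        (fun p => PySem.Int.mod p.1 step == 0 || p.1 == lastIdx)).map (fun p => p.2)
      if sampled ≠ [] ∧ sampled.getLast? ≠ some (PySem.List.pyGetD timeline_full lastIdx []) then
        sampled ++ [PySem.List.pyGetD timeline_full lastIdx []]
      else sampled

-- ===== PORT B =====
-- Literal port of Source B. `timeline_full[::step]` is PySem.List.slice?; it is `some _` on this branch
-- because step ≥ 2 ≠ 0, so `.getD []` only unwraps. `timeline_full[-1]` is in range (list nonempty).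
def timeline_sample_py_alt (timeline_full : List (List (String × String))) (sample_step : Int) : List (List (String × String)) :=
  if timeline_full = [] then []
  else
    let step : Int := max 1 sample_step
    if step ≤ 1 then timeline_full
    else
      let sampled := (PySem.List.slice? timeline_full none none step).getD []
      if PySem.Int.mod ((timeline_full.length : Int) - 1) step != 0 then
        sampled ++ [PySem.List.pyGetD timeline_full (-1) []]
      else sampled

-- ===== PRECONDITION & SPEC =====
def Spec_timeline_sample_py (timeline_full : List (List (String × String))) (sample_step : Int) (out : List (List (String × String))) : Prop := out = timeline_sample_py_alt timeline_full sample_step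
instance (timeline_full : List (List (String × String))) (sample_step : Int) (out : List (List (String × String))) : Decidable (Spec_timeline_sample_py timeline_full sample_step out) := by unfold Spec_timeline_sample_py; infer_instance

-- ===== CLAIM (what is proved, stated in full; the proofs are below) =====
def Claim_equal_timeline_sample_py : Prop := ∀ (timeline_full : List (List (String × String))) (sample_step : Int), Dom_timeline_sample_py timeline_full sample_step → Spec_timeline_sample_py timeline_full sample_step (timeline_sample_py timeline_full sample_step)

-- ===== LEMMAS AND PROOFS =====

-- The multiples of k below t, in order: filtering range t by divisibility gives the ceil(t/k) strides.
theorem pv_filter_mod_range (k t : Nat) (hk : 0 < k) :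
    (List.range t).filter (fun j => j % k == 0) = (List.range ((t + k - 1) / k)).map (· * k) := by
  induction t with
  | zero =>
    simp [Nat.div_eq_of_lt (by omega : k - 1 < k)]
  | succ t ih =>
    rw [List.range_succ, List.filter_append, ih]
    have hqr := Nat.div_add_mod t k
    have hrk : t % k < k := Nat.mod_lt _ hk
    have hm : k * (t / k + 1) = k * (t / k) + k := by ring
    have hk1 : (k - 1) / k = 0 := Nat.div_eq_of_lt (by omega)
    rcases Nat.eq_zero_or_pos (t % k) with hr | hr
    · have h1 : (t + k - 1) / k = t / k := by
        have e : t + k - 1 = k * (t / k) + (k - 1) := by omega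
        rw [e, Nat.mul_add_div hk, hk1, Nat.add_zero]
      have h2 : (t + 1 + k - 1) / k = t / k + 1 := by
        have e : t + 1 + k - 1 = k * (t / k + 1) := by omega
        rw [e, Nat.mul_div_cancel_left _ hk]
      rw [h1, h2, List.range_succ, List.map_append]
      have hf : List.filter (fun j => j % k == 0) [t] = [t] := by
        simp [hr]
      rw [hf]
      have ht : t = t / k * k := by
        have := Nat.mul_comm (t / k) k; omega
      simp [← ht]
    · have hr1 : (t % k - 1) / k = 0 := Nat.div_eq_of_lt (by omega)
      have hrr : (t % k) / k = 0 := Nat.div_eq_of_lt hrk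
      have h1 : (t + k - 1) / k = t / k + 1 := by
        have e : t + k - 1 = k * (t / k + 1) + (t % k - 1) := by omega
        rw [e, Nat.mul_add_div hk, hr1, Nat.add_zero]
      have h2 : (t + 1 + k - 1) / k = t / k + 1 := by
        have e : t + 1 + k - 1 = k * (t / k + 1) + t % k := by omega
        rw [e, Nat.mul_add_div hk, hrr, Nat.add_zero]
      have hf : List.filter (fun j => j % k == 0) [t] = [] := by
        simp [Nat.pos_iff_ne_zero.mp hr]
      rw [h1, h2, hf, List.append_nil]

-- A's kept indices: every k-th plus the last, the last appearing once, as strides ++ optional tail.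
theorem pv_crux (k n : Nat) (hk : 0 < k) (hn : 0 < n) :
    (List.range n).filter (fun j => j % k == 0 || j == n - 1) =
      (List.range ((n + k - 1) / k)).map (· * k) ++ (if (n - 1) % k = 0 then [] else [n - 1]) := by
  obtain ⟨t, rfl⟩ : ∃ t, n = t + 1 := ⟨n - 1, by omega⟩
  rw [List.range_succ, List.filter_append]
  have hcong : (List.range t).filter (fun j => j % k == 0 || j == t + 1 - 1) =
      (List.range t).filter (fun j => j % k == 0) := by
    apply List.filter_congr
    intro j hj
    have : j < t := List.mem_range.mp hj
    simp; omega
  have hlastf : List.filter (fun j => j % k == 0 || j == t + 1 - 1) [t] = [t] := by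
    simp
  rw [hcong, hlastf, pv_filter_mod_range k t hk]
  have hqr := Nat.div_add_mod t k
  have hrk : t % k < k := Nat.mod_lt _ hk
  have hm : k * (t / k + 1) = k * (t / k) + k := by ring
  have hk1 : (k - 1) / k = 0 := Nat.div_eq_of_lt (by omega)
  simp only [Nat.add_sub_cancel]
  rcases Nat.eq_zero_or_pos (t % k) with hr | hr
  · have h2 : (t + 1 + k - 1) / k = t / k + 1 := by
      have e : t + 1 + k - 1 = k * (t / k + 1) := by omega
      rw [e, Nat.mul_div_cancel_left _ hk]
    have h1 : (t + k - 1) / k = t / k := by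
      have e : t + k - 1 = k * (t / k) + (k - 1) := by omega
      rw [e, Nat.mul_add_div hk, hk1, Nat.add_zero]
    rw [h1, h2, if_pos hr, List.append_nil, List.range_succ, List.map_append]
    have ht : t = t / k * k := by
      have := Nat.mul_comm (t / k) k; omega
    simp [← ht]
  · have hrr : (t % k) / k = 0 := Nat.div_eq_of_lt hrk
    have h1 : (t + k - 1) / k = t / k + 1 := by
      have hr1 : (t % k - 1) / k = 0 := Nat.div_eq_of_lt (by omega)
      have e : t + k - 1 = k * (t / k + 1) + (t % k - 1) := by omega
      rw [e, Nat.mul_add_div hk, hr1, Nat.add_zero]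
    have h2 : (t + 1 + k - 1) / k = t / k + 1 := by
      have e : t + 1 + k - 1 = k * (t / k + 1) + t % k := by omega
      rw [e, Nat.mul_add_div hk, hrr, Nat.add_zero]
    rw [h1, h2, if_neg (by omega)]

-- A's comprehension, rewritten over Nat indices of range.
theorem pv_A_form {α : Type} (xs : List α) (d : α) (k : Nat) (hx : xs ≠ []) :
    ((PySem.List.enumerate xs).filter
        (fun p => PySem.Int.mod p.1 (k : Int) == 0 || p.1 == (xs.length : Int) - 1)).map
      (fun p => p.2)
    = ((List.range xs.length).filter (fun j => j % k == 0 || j == xs.length - 1)).map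
        (fun j => xs.getD j d) := by
  have hn : 0 < xs.length := List.length_pos_of_ne_nil hx
  rw [PySem.List.enumerate_eq_map_pyRange xs d]
  have hlen : PySem.List.len xs = (xs.length : Int) := by simp
  rw [hlen, PySem.List.pyRange_zero_nat, List.map_map, List.filter_map, List.map_map]
  have hc : List.filter
        ((fun (p : Int × α) => PySem.Int.mod p.1 (k : Int) == 0 || p.1 == (xs.length : Int) - 1) ∘
          (fun (j : Int) => (j, PySem.List.pyGetD xs j d)) ∘ fun (m : Nat) => (m : Int))
        (List.range xs.length)
      = List.filter (fun j => j % k == 0 || j == xs.length - 1) (List.range xs.length) := by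
    apply List.filter_congr
    intro j hj
    have hjlt : j < xs.length := List.mem_range.mp hj
    have e1 : PySem.Int.mod ((j : Nat) : Int) (k : Int) = (((j % k : Nat)) : Int) :=
      PySem.Int.mod_natCast j k
    have e2 : ((xs.length : Int) - 1) = ((xs.length - 1 : Nat) : Int) := by omega
    simp only [Function.comp_apply]
    rw [e1, e2]
    have h1 : ((((j % k : Nat)) : Int) == 0) = (j % k == 0) := by
      by_cases h : j % k = 0 <;> simp [h, Int.natCast_dvd_natCast, Nat.dvd_iff_mod_eq_zero]
    have h2 : (((j : Nat) : Int) == ((xs.length - 1 : Nat) : Int)) = (j == xs.length - 1) := by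
      by_cases h : j = xs.length - 1 <;> simp [h]
    rw [h1, h2]
  rw [hc]
  apply List.map_congr_left
  intro j hj
  simp [Function.comp, PySem.List.pyGetD_natCast]

-- B's stride slice, evaluated: every k-th element, ceil(n/k) of them.
theorem pv_B_form {α : Type} (xs : List α) (d : α) (k : Nat) (hk : 0 < k) (hx : xs ≠ []) :
    PySem.List.slice? xs none none (k : Int) =
      some ((List.range ((xs.length + k - 1) / k)).map (fun j => xs.getD (k * j) d)) := by
  have hn : 0 < xs.length := List.length_pos_of_ne_nil hx
  have hk0 : ((k : Int) = 0) = False := by simp; omega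
  have hcnt : (((xs.length : Int) - 0 + (k : Int) - 1) / (k : Int)).toNat = (xs.length + k - 1) / k := by
    have e : ((xs.length : Int) - 0 + (k : Int) - 1) = ((xs.length + k - 1 : Nat) : Int) := by
      omega
    rw [e, ← Int.natCast_div, Int.toNat_natCast]
  simp only [PySem.List.slice?, PySem.List.sliceIndices, hk0, if_false]
  have hklt : ¬ ((k : Int) < 0) := by omega
  have hkpos : (0 : Int) < (k : Int) := by omega
  have hnpos : (0 : Int) < (xs.length : Int) := by omega
  simp only [hklt, if_false, if_pos hkpos, if_pos hnpos]
  rw [hcnt]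
  congr 1
  apply List.filterMap_eq_map_iff_forall_eq_some.mpr
  intro j hj
  have hjlt : j < (xs.length + k - 1) / k := List.mem_range.mp hj
  have hb : k * ((xs.length + k - 1) / k) ≤ xs.length + k - 1 := Nat.mul_div_le (xs.length + k - 1) k
  have hlt : k * j < xs.length := by
    have : k * (j + 1) ≤ k * ((xs.length + k - 1) / k) := Nat.mul_le_mul_left _ hjlt
    have hm : k * (j + 1) = k * j + k := by ring
    omega
  have hidx : ((0 : Int) + (k : Int) * (j : Int)).toNat = k * j := by
    omega
  rw [hidx, List.getElem?_eq_getElem hlt, List.getD_eq_getElem _ _ hlt]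

-- The last kept row of A's comprehension is the row at index n-1.
theorem pv_getLast_filter_range {α : Type} (n : Nat) (hn : 0 < n) (p : Nat → Bool)
    (hp : p (n - 1) = true) (g : Nat → α) :
    (((List.range n).filter p).map g).getLast? = some (g (n - 1)) := by
  obtain ⟨t, rfl⟩ : ∃ t, n = t + 1 := ⟨n - 1, by omega⟩
  simp only [Nat.add_sub_cancel] at hp ⊢
  rw [List.range_succ, List.filter_append, List.map_append]
  simp [hp]

-- timeline_full[-1] is the row at index n-1.
theorem pv_pyGetD_neg_one {α : Type} (xs : List α) (d : α) (hx : xs ≠ []) :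
    PySem.List.pyGetD xs (-1) d = xs.getD (xs.length - 1) d := by
  have hn : 0 < xs.length := List.length_pos_of_ne_nil hx
  have hlt : xs.length - 1 < xs.length := by omega
  have h1 : ¬ ((0 : Int) ≤ -1) := by omega
  have h2 : -(xs.length : Int) ≤ -1 := by omega
  simp only [PySem.List.pyGetD, PySem.List.pyGet?, PySem.List.pyIdx?, if_neg h1, if_pos h2]
  have : (-(-1 : Int)).toNat = 1 := by omega
  rw [this]
  simp [List.getElem?_eq_getElem hlt]

theorem timeline_sample_py_spec : Claim_equal_timeline_sample_py := by
  intro tf ss _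
  unfold Spec_timeline_sample_py timeline_sample_py timeline_sample_py_alt
  by_cases h0 : tf = []
  · simp [h0]
  · simp only [if_neg h0]
    by_cases h1 : max 1 ss ≤ 1
    · simp only [if_pos h1]
    · simp only [if_neg h1]
      obtain ⟨k, hk2, hks⟩ : ∃ k : Nat, 2 ≤ k ∧ max 1 ss = (k : Int) := by
        refine ⟨(max 1 ss).toNat, by omega, by omega⟩
      rw [hks]
      have hk : 0 < k := by omega
      have hn : 0 < tf.length := List.length_pos_of_ne_nil h0
      have elast : ((tf.length : Int) - 1) = ((tf.length - 1 : Nat) : Int) := by omega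
      have hgd : PySem.List.pyGetD tf ((tf.length : Int) - 1) [] = tf.getD (tf.length - 1) [] := by
        rw [elast, PySem.List.pyGetD_natCast]
      have hA := pv_A_form tf ([] : List (String × String)) k h0
      have hlast : ((((List.range tf.length).filter
            (fun j => j % k == 0 || j == tf.length - 1)).map (fun j => tf.getD j [])).getLast?)
          = some (tf.getD (tf.length - 1) []) :=
        pv_getLast_filter_range tf.length hn _ (by simp) _
      -- A's trailing append guard is never taken
      rw [hA, hgd]
      rw [if_neg (by
        rintro ⟨-, hne⟩
        exact hne hlast)]
      -- evaluate both sides to strides ++ optional last row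
      rw [pv_crux k tf.length hk hn, List.map_append, List.map_map]
      rw [pv_B_form tf ([] : List (String × String)) k hk h0, Option.getD_some]
      rw [elast, PySem.Int.mod_natCast]
      by_cases hr : (tf.length - 1) % k = 0
      · rw [if_pos hr, if_neg (by simp [hr])]
        simp [Function.comp, Nat.mul_comm]
      · rw [if_neg hr, if_pos (by simp [hr, Int.natCast_dvd_natCast, Nat.dvd_iff_mod_eq_zero])]
        rw [pv_pyGetD_neg_one tf ([] : List (String × String)) h0]
        simp [Function.comp, Nat.mul_comm]
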